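-- pv_equiv track=rewrite | github.com/douglashardman/tradebot | src/analysis/detectors/divergence.py | _find_troughs
-- ===== SOURCE A (Python) =====
-- from typing import Any, Dict, List, Tuple
--
-- def _find_troughs(values: List) -> List[Tuple[int, Any]]:
--     """Find local minima in a series."""
--     troughs = []
--     for i in range(1, len(values) - 1):
--         if values[i] < values[i-1] and values[i] < values[i+1]:
--             troughs.append((i, values[i]))
--
--     # Include last value if it's lower than previous
--     if len(values) >= 2 and values[-1] < values[-2]:
--         troughs.append((len(values) - 1, values[-1]))
--
--     return troughs
-- ===== SOURCE B (Python) =====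
-- from typing import Any, List, Tuple
--
-- def _find_troughs(values: List) -> List[Tuple[int, Any]]:
--     """One-pass state machine over consecutive differences: a trough is where
--     the direction flips from falling to rising; a final falling step yields the endpoint."""
--     troughs = []
--     falling = False
--     for i in range(1, len(values)):
--         d = values[i] - values[i - 1]
--         if falling and d > 0:
--             troughs.append((i - 1, values[i - 1]))
--         falling = d < 0
--     if falling:
--         troughs.append((len(values) - 1, values[-1]))
--     return troughs
-- ===== Notes on version B (the rewrite author's own statement) =====
-- stated objective: alternative
-- what changed: Replaces A's index-range loop with triple-neighbor comparisons (and a separate indexed endpoint check) by a single state-machine pass over consecutive differences that emits a trough whenever the direction flips from falling to rising and emits the endpoint when the final step is falling.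
import Mathlib
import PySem

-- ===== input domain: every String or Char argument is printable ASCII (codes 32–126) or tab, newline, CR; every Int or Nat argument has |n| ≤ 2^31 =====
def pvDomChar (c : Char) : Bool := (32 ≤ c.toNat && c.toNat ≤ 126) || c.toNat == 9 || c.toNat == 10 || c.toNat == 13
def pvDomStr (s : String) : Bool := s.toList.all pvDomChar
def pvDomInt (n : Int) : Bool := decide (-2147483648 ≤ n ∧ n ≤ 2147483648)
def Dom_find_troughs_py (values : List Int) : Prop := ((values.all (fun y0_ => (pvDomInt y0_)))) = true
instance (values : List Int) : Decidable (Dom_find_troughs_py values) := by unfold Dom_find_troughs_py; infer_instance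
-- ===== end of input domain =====

-- B replaces A's indexed triple-neighbor scan by a one-pass falling/rising state machine over
-- consecutive differences (objective: alternative decomposition, same O(n) cost).

-- ===== PORT A =====
-- Loop body of A's `for i in range(1, len(values)-1)`; all indices i-1, i, i+1 are in range
-- on every iteration, so `pyGetD … 0` is exact for Python's values[...] there.
def pvStepA (values : List Int) (acc : List (Int × Int)) (i : Int) : List (Int × Int) :=
  if PySem.List.pyGetD values i 0 < PySem.List.pyGetD values (i - 1) 0 ∧
     PySem.List.pyGetD values i 0 < PySem.List.pyGetD values (i + 1) 0
  then acc ++ [(i, PySem.List.pyGetD values i 0)] else acc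

def find_troughs_py (values : List Int) : List (Int × Int) :=
  let n : Int := values.length
  let troughs := (PySem.List.pyRange 1 (n - 1)).foldl (pvStepA values) []
  -- values[-1], values[-2]: negative indexing, in range under the guard 2 ≤ n
  if 2 ≤ n ∧ PySem.List.pyGetD values (-1) 0 < PySem.List.pyGetD values (-2) 0
  then troughs ++ [(n - 1, PySem.List.pyGetD values (-1) 0)]
  else troughs

-- ===== PORT B =====
-- B's loop `for i in range(1, len(values))` carrying (prev = values[i-1], falling); at loop
-- exit prev = values[-1] and i = len(values), so the final append is (i-1, prev).
def pvLoopB (acc : List (Int × Int)) (prev : Int) (i : Int) (falling : Bool) (rest : List Int) :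
    List (Int × Int) :=
  match rest with
  | [] => if falling then acc ++ [(i - 1, prev)] else acc
  | v :: vs =>
    let d := v - prev
    pvLoopB (if falling ∧ 0 < d then acc ++ [(i - 1, prev)] else acc) v (i + 1) (decide (d < 0)) vs

def find_troughs_py_alt (values : List Int) : List (Int × Int) :=
  match values with
  | [] => []
  | a :: vs => pvLoopB [] a 1 false vs

-- ===== PRECONDITION & SPEC =====
def Spec_find_troughs_py (values : List Int) (out : List (Int × Int)) : Prop := out = find_troughs_py_alt values
instance (values : List Int) (out : List (Int × Int)) : Decidable (Spec_find_troughs_py values out) := by unfold Spec_find_troughs_py; infer_instance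

-- ===== CLAIM (what is proved, stated in full; the proofs are below) =====
def Claim_equal_find_troughs_py : Prop := ∀ (values : List Int), Dom_find_troughs_py values → Spec_find_troughs_py values (find_troughs_py values)

-- ===== LEMMAS AND PROOFS =====

/-- values[k] for an in-range Nat index, with default 0 (proof-side shorthand). -/
def pvGd (v : List Int) (k : Nat) : Int := v.getD k 0

lemma pvGetD_natCast_eq (v : List Int) (k : Nat) :
    PySem.List.pyGetD v (k : Int) 0 = pvGd v k := by
  simp [PySem.List.pyGetD_natCast, pvGd]

lemma pvGetD_neg_one (v : List Int) (h : 1 ≤ v.length) :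
    PySem.List.pyGetD v (-1) 0 = pvGd v (v.length - 1) := by
  unfold pvGd
  simp only [PySem.List.pyGetD, PySem.List.pyGet?, PySem.List.pyIdx?]
  rw [if_neg (by omega), if_pos (by omega)]
  simp [List.getD]

lemma pvGetD_neg_two (v : List Int) (h : 2 ≤ v.length) :
    PySem.List.pyGetD v (-2) 0 = pvGd v (v.length - 2) := by
  unfold pvGd
  simp only [PySem.List.pyGetD, PySem.List.pyGet?, PySem.List.pyIdx?]
  rw [if_neg (by omega), if_pos (by omega)]
  simp [List.getD]

/-- Main invariant: from position j (2 ≤ j ≤ n) with prev = v[j-1] and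
    falling = (v[j-1] < v[j-2]), B's loop produces A's remaining fold plus A's endpoint check. -/
lemma pvLoopB_eq (v : List Int) (k : Nat) : ∀ (j : Nat) (acc : List (Int × Int)),
    v.length - j = k → 2 ≤ j → j ≤ v.length →
    pvLoopB acc (pvGd v (j - 1)) (j : Int) (decide (pvGd v (j - 1) < pvGd v (j - 2))) (v.drop j)
    = (PySem.List.pyRange ((j - 1 : Nat) : Int) ((v.length : Int) - 1)).foldl (pvStepA v) acc
      ++ (if pvGd v (v.length - 1) < pvGd v (v.length - 2)
          then [((v.length : Int) - 1, pvGd v (v.length - 1))] else []) := by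
  induction k with
  | zero =>
    intro j acc hk h2 hj
    rw [List.drop_eq_nil_of_le (by omega)]
    rw [show PySem.List.pyRange ((j - 1 : Nat) : Int) ((v.length : Int) - 1) = [] from by
      rw [show ((v.length : Int) - 1) = ((j - 1 : Nat) : Int) from by omega]
      simp [PySem.List.pyRange]]
    rw [List.foldl_nil,
        show v.length - 1 = j - 1 from by omega, show v.length - 2 = j - 2 from by omega,
        show ((v.length : Int) - 1) = ((j : Int) - 1) from by omega]
    show (if decide (pvGd v (j - 1) < pvGd v (j - 2)) = true
          then acc ++ [((j : Int) - 1, pvGd v (j - 1))] else acc) = _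
    by_cases hc : pvGd v (j - 1) < pvGd v (j - 2)
    · rw [if_pos (by simpa using hc), if_pos hc]
    · rw [if_neg (by simpa using hc), if_neg hc, List.append_nil]
  | succ k ih =>
    intro j acc hk h2 hj
    have hjlt : j < v.length := by omega
    have hgj : v[j] = pvGd v j := (List.getD_eq_getElem v 0 hjlt).symm
    rw [List.drop_eq_getElem_cons hjlt, hgj]
    show pvLoopB
        (if decide (pvGd v (j - 1) < pvGd v (j - 2)) = true ∧ 0 < pvGd v j - pvGd v (j - 1)
         then acc ++ [((j : Int) - 1, pvGd v (j - 1))] else acc)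
        (pvGd v j) ((j : Int) + 1) (decide (pvGd v j - pvGd v (j - 1) < 0)) (v.drop (j + 1)) = _
    have ih' := ih (j + 1)
        (if decide (pvGd v (j - 1) < pvGd v (j - 2)) = true ∧ 0 < pvGd v j - pvGd v (j - 1)
         then acc ++ [((j : Int) - 1, pvGd v (j - 1))] else acc) (by omega) (by omega) (by omega)
    rw [show j + 1 - 1 = j from rfl, show j + 1 - 2 = j - 1 from by omega] at ih'
    have hfall : (decide (pvGd v j - pvGd v (j - 1) < 0) : Bool)
        = decide (pvGd v j < pvGd v (j - 1)) := by rw [decide_eq_decide]; omega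
    have hidx : ((j : Int) + 1) = ((j + 1 : Nat) : Int) := by omega
    rw [hfall, hidx, ih']
    -- fold A's step at index j-1 into the range on the right
    rw [PySem.List.pyRange_one_cons (a := ((j - 1 : Nat) : Int)) (by omega),
        show (((j - 1 : Nat) : Int) + 1) = ((j : Nat) : Int) from by omega, List.foldl_cons]
    have hstep : pvStepA v acc ((j - 1 : Nat) : Int)
        = (if decide (pvGd v (j - 1) < pvGd v (j - 2)) = true ∧ 0 < pvGd v j - pvGd v (j - 1)
           then acc ++ [((j : Int) - 1, pvGd v (j - 1))] else acc) := by
      unfold pvStepA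
      rw [show (((j - 1 : Nat) : Int) - 1) = ((j - 2 : Nat) : Int) from by omega,
          show (((j - 1 : Nat) : Int) + 1) = ((j : Nat) : Int) from by omega,
          pvGetD_natCast_eq, pvGetD_natCast_eq, pvGetD_natCast_eq,
          show ((j - 1 : Nat) : Int) = ((j : Int) - 1) from by omega]
      by_cases hc : pvGd v (j - 1) < pvGd v (j - 2) ∧ pvGd v (j - 1) < pvGd v j
      · rw [if_pos hc, if_pos ⟨by simp [hc.1], by omega⟩]
      · rw [if_neg hc, if_neg (by
          rintro ⟨hd1, hd2⟩
          exact hc ⟨by simpa using hd1, by omega⟩)]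
    rw [hstep]
-- ===== VERDICT (by name: the statement is the Claim_ definition above) =====
theorem find_troughs_py_spec : Claim_equal_find_troughs_py := by
  intro values _
  show find_troughs_py values = find_troughs_py_alt values
  match values with
  | [] => rfl
  | [a] =>
    simp [find_troughs_py, find_troughs_py_alt, pvLoopB, PySem.List.pyRange]
  | a :: b :: rest =>
    have hBstep : find_troughs_py_alt (a :: b :: rest)
        = pvLoopB [] b 2 (decide (b - a < 0)) rest := by
      simp [find_troughs_py_alt, pvLoopB]
    rw [hBstep]
    have hd : (decide (b - a < 0) : Bool)
        = decide (pvGd (a :: b :: rest) (2 - 1) < pvGd (a :: b :: rest) (2 - 2)) := by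
      rw [decide_eq_decide]
      show b - a < 0 ↔ b < a
      omega
    conv_rhs => rw [hd]
    have hmain := pvLoopB_eq (a :: b :: rest) ((a :: b :: rest).length - 2) 2 [] rfl
      (by omega) (by simp)
    refine Eq.trans ?_ hmain.symm
    simp only [find_troughs_py]
    rw [show ((2 - 1 : Nat) : Int) = (1 : Int) from rfl]
    rw [pvGetD_neg_one _ (by simp), pvGetD_neg_two _ (by simp)]
    by_cases hc : pvGd (a :: b :: rest) ((a :: b :: rest).length - 1)
        < pvGd (a :: b :: rest) ((a :: b :: rest).length - 2)
    · rw [if_pos ⟨by simp; omega, hc⟩, if_pos hc]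
    · rw [if_neg (fun h => hc h.2), if_neg hc, List.append_nil]
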